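-- pv_equiv track=rewrite | github.com/NicolasBizzozzero/AdventOfCode | src/problems/year2015/day13_knights_dinner_table.py | arrangement_happiness
-- ===== SOURCE A (Python) =====
-- def arrangement_happiness(
--     arrangement: list[str], cost_matrix: dict[str, dict[str, int]]
-- ) -> int:
--     happiness = 0
--
--     # Add cost for first and last neighbours
--     happiness += cost_matrix[arrangement[0]][arrangement[1]]
--     happiness += cost_matrix[arrangement[0]][arrangement[-1]]
--     happiness += cost_matrix[arrangement[-1]][arrangement[-2]]
--     happiness += cost_matrix[arrangement[-1]][arrangement[0]]
--
--     for idx_guest in range(1, len(arrangement) - 1):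
--         guest = arrangement[idx_guest]
--         left_neighbour = arrangement[idx_guest - 1]
--         right_neighbour = arrangement[idx_guest + 1]
--         happiness += cost_matrix[guest][left_neighbour]
--         happiness += cost_matrix[guest][right_neighbour]
--
--     return happiness
-- ===== SOURCE B (Python) =====
-- def arrangement_happiness(
--     arrangement: list[str], cost_matrix: dict[str, dict[str, int]]
-- ) -> int:
--     rotated = arrangement[1:] + arrangement[:1]
--     total = 0
--     for a, b in zip(arrangement, rotated):
--         total += cost_matrix[a][b] + cost_matrix[b][a]
--     return total
-- ===== Notes on version B (the rewrite author's own statement) =====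
-- stated objective: simpler
-- what changed: B sums cost[a][b]+cost[b][a] over the adjacent seat pairs around the circle (each seat zipped with the rotated list), replacing A's per-guest two-neighbour loop plus four separate endpoint additions.
import Mathlib
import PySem

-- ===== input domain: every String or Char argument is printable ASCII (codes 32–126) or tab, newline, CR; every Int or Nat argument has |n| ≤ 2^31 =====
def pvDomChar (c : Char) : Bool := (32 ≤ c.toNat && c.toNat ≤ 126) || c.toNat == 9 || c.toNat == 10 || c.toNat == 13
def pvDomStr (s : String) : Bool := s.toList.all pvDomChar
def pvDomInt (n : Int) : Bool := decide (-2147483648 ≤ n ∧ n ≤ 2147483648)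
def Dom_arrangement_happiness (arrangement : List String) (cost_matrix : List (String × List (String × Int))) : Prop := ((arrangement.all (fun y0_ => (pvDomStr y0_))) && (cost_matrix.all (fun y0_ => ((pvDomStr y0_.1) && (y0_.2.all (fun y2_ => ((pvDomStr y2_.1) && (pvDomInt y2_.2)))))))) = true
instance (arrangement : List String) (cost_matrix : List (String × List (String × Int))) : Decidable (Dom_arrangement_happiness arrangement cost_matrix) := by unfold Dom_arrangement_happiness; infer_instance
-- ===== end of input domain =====

-- B replaces A's per-guest two-neighbour loop plus four endpoint additions by one sum of
-- cost[a][b] + cost[b][a] over the adjacent seat pairs around the circle (same O(n) cost).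

-- cost_matrix[g][h] as an Option (none exactly where Python raises KeyError); shared lookup primitive.
def pvLookup2 (cost_matrix : List (String × List (String × Int))) (g h : String) : Option Int :=
  ((PySem.Dict.mk cost_matrix).get? g).bind (fun row => (PySem.Dict.mk row).get? h)

-- total form of cost_matrix[g][h]; the default 0 is unreachable under Pre_.
def pvCost (cost_matrix : List (String × List (String × Int))) (g h : String) : Int :=
  (pvLookup2 cost_matrix g h).getD 0

-- ===== PORT A =====
def arrangement_happiness (arrangement : List String) (cost_matrix : List (String × List (String × Int))) : Int :=
  let happiness : Int := 0
  let happiness := happiness + pvCost cost_matrix (PySem.List.pyGetD arrangement 0 "") (PySem.List.pyGetD arrangement 1 "")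
  let happiness := happiness + pvCost cost_matrix (PySem.List.pyGetD arrangement 0 "") (PySem.List.pyGetD arrangement (-1) "")
  let happiness := happiness + pvCost cost_matrix (PySem.List.pyGetD arrangement (-1) "") (PySem.List.pyGetD arrangement (-2) "")
  let happiness := happiness + pvCost cost_matrix (PySem.List.pyGetD arrangement (-1) "") (PySem.List.pyGetD arrangement 0 "")
  (PySem.List.pyRange 1 ((arrangement.length : Int) - 1) 1).foldl
    (fun happiness idx_guest =>
      let guest := PySem.List.pyGetD arrangement idx_guest ""
      let left_neighbour := PySem.List.pyGetD arrangement (idx_guest - 1) ""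
      let right_neighbour := PySem.List.pyGetD arrangement (idx_guest + 1) ""
      happiness + pvCost cost_matrix guest left_neighbour + pvCost cost_matrix guest right_neighbour)
    happiness

-- ===== PORT B =====
def arrangement_happiness_alt (arrangement : List String) (cost_matrix : List (String × List (String × Int))) : Int :=
  let rotated := PySem.List.slice arrangement (some 1) none ++ PySem.List.slice arrangement none (some 1)
  (arrangement.zip rotated).foldl
    (fun total p => total + (pvCost cost_matrix p.1 p.2 + pvCost cost_matrix p.2 p.1)) 0

-- ===== PRECONDITION & SPEC =====
-- Pre_: at least two guests (otherwise A's indexing raises IndexError), and for every cyclically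
-- adjacent pair of guests both directed cost lookups succeed (otherwise A raises KeyError).
def Pre_arrangement_happiness (arrangement : List String) (cost_matrix : List (String × List (String × Int))) : Prop :=
  2 ≤ arrangement.length ∧
  ∀ i < arrangement.length,
    (pvLookup2 cost_matrix (arrangement.getD i "") (arrangement.getD ((i + 1) % arrangement.length) "")).isSome = true ∧
    (pvLookup2 cost_matrix (arrangement.getD ((i + 1) % arrangement.length) "") (arrangement.getD i "")).isSome = true
instance (arrangement : List String) (cost_matrix : List (String × List (String × Int))) : Decidable (Pre_arrangement_happiness arrangement cost_matrix) := by unfold Pre_arrangement_happiness; infer_instance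

def pvWitness_arrangement_happiness : List String × (List (String × List (String × Int))) :=
  (["alice", "bob", "carol"],
   [("alice", [("bob", 2), ("carol", -3)]),
    ("bob", [("alice", 5), ("carol", 1)]),
    ("carol", [("alice", 0), ("bob", -7)])])

def Spec_arrangement_happiness (arrangement : List String) (cost_matrix : List (String × List (String × Int))) (out : Int) : Prop := out = arrangement_happiness_alt arrangement cost_matrix
instance (arrangement : List String) (cost_matrix : List (String × List (String × Int))) (out : Int) : Decidable (Spec_arrangement_happiness arrangement cost_matrix out) := by unfold Spec_arrangement_happiness; infer_instance

-- ===== CLAIM (what is proved, stated in full; the proofs are below) =====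
def Claim_equal_arrangement_happiness : Prop := ∀ (arrangement : List String) (cost_matrix : List (String × List (String × Int))), Dom_arrangement_happiness arrangement cost_matrix → Pre_arrangement_happiness arrangement cost_matrix → Spec_arrangement_happiness arrangement cost_matrix (arrangement_happiness arrangement cost_matrix)

-- ===== LEMMAS AND PROOFS =====

-- A in closed form: four endpoint terms plus an indexed sum over the interior guests.
theorem pvA_eq (arrangement : List String) (cost_matrix : List (String × List (String × Int)))
    (h : 2 ≤ arrangement.length) :
    arrangement_happiness arrangement cost_matrix =
      (((0 : Int)
        + pvCost cost_matrix (arrangement.getD 0 "") (arrangement.getD 1 "")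
        + pvCost cost_matrix (arrangement.getD 0 "") (arrangement.getD (arrangement.length - 1) "")
        + pvCost cost_matrix (arrangement.getD (arrangement.length - 1) "") (arrangement.getD (arrangement.length - 2) "")
        + pvCost cost_matrix (arrangement.getD (arrangement.length - 1) "") (arrangement.getD 0 ""))
       + ∑ k ∈ Finset.range (arrangement.length - 2),
          (pvCost cost_matrix (arrangement.getD (k + 1) "") (arrangement.getD k "")
           + pvCost cost_matrix (arrangement.getD (k + 1) "") (arrangement.getD (k + 2) ""))) := by
  unfold arrangement_happiness
  have e0 : PySem.List.pyGetD arrangement 0 "" = arrangement.getD 0 "" := PySem.List.pyGetD_zero _ _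
  have e1 : PySem.List.pyGetD arrangement 1 "" = arrangement.getD 1 "" := by simp [pysem]
  have em1 : PySem.List.pyGetD arrangement (-1) "" = arrangement.getD (arrangement.length - 1) "" := by
    rw [PySem.List.pyGetD_neg_ofNat arrangement 1 "" (by omega) (by omega)]
    exact (List.getD_eq_getElem _ _ (by omega)).symm
  have em2 : PySem.List.pyGetD arrangement (-2) "" = arrangement.getD (arrangement.length - 2) "" := by
    rw [PySem.List.pyGetD_neg_ofNat arrangement 2 "" (by omega) (by omega)]
    exact (List.getD_eq_getElem _ _ (by omega)).symm
  rw [e0, e1, em1, em2, PySem.List.pyRange_one,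
      show ((arrangement.length : Int) - 1 - 1).toNat = arrangement.length - 2 by omega,
      List.foldl_map]
  rw [show (fun (happiness : Int) (k : Nat) =>
        happiness + pvCost cost_matrix (PySem.List.pyGetD arrangement (1 + (k:Int)) "") (PySem.List.pyGetD arrangement (1 + (k:Int) - 1) "")
          + pvCost cost_matrix (PySem.List.pyGetD arrangement (1 + (k:Int)) "") (PySem.List.pyGetD arrangement (1 + (k:Int) + 1) ""))
      = (fun (acc : Int) (k : Nat) => acc +
          (pvCost cost_matrix (arrangement.getD (k + 1) "") (arrangement.getD k "")
           + pvCost cost_matrix (arrangement.getD (k + 1) "") (arrangement.getD (k + 2) ""))) from by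
    funext acc k
    rw [show (1 + (k:Int)) = (((k + 1 : Nat)):Int) by push_cast; ring,
        show ((((k + 1 : Nat)):Int) - 1) = ((k:Nat):Int) by push_cast; ring,
        show ((((k + 1 : Nat)):Int) + 1) = (((k + 2 : Nat)):Int) by push_cast; ring,
        PySem.List.pyGetD_natCast, PySem.List.pyGetD_natCast, PySem.List.pyGetD_natCast]
    ring]
  rw [PySem.List.foldl_add]
  rfl

-- sum over a zip as an indexed sum (lengths equal)
theorem pvZipSum (g : String → String → Int) :
    ∀ (l r : List String), l.length = r.length →
      ((l.zip r).map (fun p => g p.1 p.2)).sum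
        = ∑ j ∈ Finset.range l.length, g (l.getD j "") (r.getD j "") := by
  intro l
  induction l with
  | nil => intro r _; simp
  | cons a l' ih =>
    intro r hr
    cases r with
    | nil => simp at hr
    | cons b r' =>
      simp only [List.zip_cons_cons, List.map_cons, List.sum_cons, List.length_cons]
      rw [Finset.sum_range_succ' (fun j => g ((a :: l').getD j "") ((b :: r').getD j "")),
          ih r' (by simpa using hr)]
      simp
      ring

-- B in closed form: the same indexed sum over all cyclic edges.
theorem pvB_eq (arrangement : List String) (cost_matrix : List (String × List (String × Int)))
    (h : 2 ≤ arrangement.length) :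
    arrangement_happiness_alt arrangement cost_matrix =
      (∑ j ∈ Finset.range (arrangement.length - 1),
          (pvCost cost_matrix (arrangement.getD j "") (arrangement.getD (j + 1) "")
           + pvCost cost_matrix (arrangement.getD (j + 1) "") (arrangement.getD j "")))
       + (pvCost cost_matrix (arrangement.getD (arrangement.length - 1) "") (arrangement.getD 0 "")
          + pvCost cost_matrix (arrangement.getD 0 "") (arrangement.getD (arrangement.length - 1) "")) := by
  unfold arrangement_happiness_alt
  rw [PySem.List.slice_from_one, show PySem.List.slice arrangement none (some 1) = arrangement.take 1 by
        rw [PySem.List.slice_to] <;> simp]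
  have hlen : arrangement.length = (arrangement.tail ++ arrangement.take 1).length := by
    simp [List.length_tail]; omega
  rw [PySem.List.foldl_add, pvZipSum (fun a b => pvCost cost_matrix a b + pvCost cost_matrix b a) arrangement _ hlen, zero_add]
  have hrot : ∀ j < arrangement.length,
      (arrangement.tail ++ arrangement.take 1).getD j ""
        = if j + 1 < arrangement.length then arrangement.getD (j + 1) "" else arrangement.getD 0 "" := by
    intro j hj
    by_cases hj1 : j + 1 < arrangement.length
    · rw [if_pos hj1, List.getD_append _ _ _ _ (by simp [List.length_tail]; omega)]
      rw [← List.drop_one]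
      simp [List.getD_eq_getElem?_getD]
    · rw [if_neg hj1, List.getD_eq_getElem?_getD,
          List.getElem?_append_right (by simp [List.length_tail]; omega)]
      have : j - (arrangement.tail).length = 0 := by simp [List.length_tail]; omega
      rw [this]
      cases arrangement <;> simp_all
  obtain ⟨m, hm⟩ : ∃ m, arrangement.length = m + 2 := ⟨arrangement.length - 2, by omega⟩
  rw [Finset.sum_congr rfl (fun j hj => by
        rw [hrot j (Finset.mem_range.mp hj)])]
  rw [hm]
  simp only [show m + 2 - 1 = m + 1 from rfl]
  rw [Finset.sum_range_succ, if_neg (by omega : ¬ (m + 1 + 1 < m + 2))]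
  have : ∀ j ∈ Finset.range (m + 1),
      (pvCost cost_matrix (arrangement.getD j "") (if j + 1 < m + 2 then arrangement.getD (j+1) "" else arrangement.getD 0 "")
       + pvCost cost_matrix (if j + 1 < m + 2 then arrangement.getD (j+1) "" else arrangement.getD 0 "") (arrangement.getD j ""))
      = (pvCost cost_matrix (arrangement.getD j "") (arrangement.getD (j+1) "")
         + pvCost cost_matrix (arrangement.getD (j+1) "") (arrangement.getD j "")) := by
    intro j hj
    rw [if_pos (by have := Finset.mem_range.mp hj; omega)]
  rw [Finset.sum_congr rfl this]

-- ===== VERDICT (by name: the statement is the Claim_ definition above) =====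
theorem arrangement_happiness_spec : Claim_equal_arrangement_happiness := by
  intro arrangement cost_matrix _ hpre
  obtain ⟨h2, -⟩ := hpre
  unfold Spec_arrangement_happiness
  rw [pvA_eq arrangement cost_matrix h2, pvB_eq arrangement cost_matrix h2]
  obtain ⟨m, hm⟩ : ∃ m, arrangement.length = m + 2 := ⟨arrangement.length - 2, by omega⟩
  rw [hm]
  simp only [Nat.add_sub_cancel, show m + 2 - 1 = m + 1 from rfl]
  rw [Finset.sum_add_distrib, Finset.sum_add_distrib,
      Finset.sum_range_succ'
        (fun j => pvCost cost_matrix (arrangement.getD j "") (arrangement.getD (j + 1) "")) m,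
      Finset.sum_range_succ
        (fun j => pvCost cost_matrix (arrangement.getD (j + 1) "") (arrangement.getD j "")) m]
  ring
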